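-- pv_equiv track=rewrite | github.com/reivak720/cows | racer.py | natasha_c
-- ===== SOURCE A (Python) =====
-- def natasha_c(cows,limit=10):
--
--     newcows =cows.copy()
--     trip= result =[]
--     weight =limit
--     checkcows= sorted(newcows.items(), key= lambda x:x[1] , reverse = True)
--
--     if len(checkcows) == 0:
--         return trip
--
--     #start trip if there is space & cows to transport
--     for i,(x,y) in enumerate(checkcows):
--         if y <= limit:
--             trip.append(x)
--             limit -= y
--
--     #stop trip as no more cows can fit even if there is space
--     #check if there are cows remaining, if so, start next trip
--     if len(newcows) != 0:
--         for cow in list(newcows.keys()):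
--             if cow in trip:
--                 newcows.pop(cow)
--         result = ([trip] + natasha_c(newcows,limit=weight))
--     return result
-- ===== SOURCE B (Python) =====
-- def natasha_c(cows, limit=10):
--     # Sort once (stable, descending weight); each round is a single pass that
--     # splits the still-sorted remainder into this trip and the rest.
--     remaining = sorted(cows.items(), key=lambda kv: kv[1], reverse=True)
--     trips = []
--     while remaining:
--         cap = limit
--         trip = []
--         rest = []
--         for name, w in remaining:
--             if w <= cap:
--                 trip.append(name)
--                 cap -= w
--             else:
--                 rest.append((name, w))
--         trips.append(trip)
--         remaining = rest
--     return trips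
-- ===== Notes on version B (the rewrite author's own statement) =====
-- stated objective: faster
-- what changed: B sorts the cows once and forms each trip by a single partition pass over the still-sorted remainder, instead of A's per-round re-sort of the dict plus a quadratic key-membership/pop loop and recursion.
import Mathlib
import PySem

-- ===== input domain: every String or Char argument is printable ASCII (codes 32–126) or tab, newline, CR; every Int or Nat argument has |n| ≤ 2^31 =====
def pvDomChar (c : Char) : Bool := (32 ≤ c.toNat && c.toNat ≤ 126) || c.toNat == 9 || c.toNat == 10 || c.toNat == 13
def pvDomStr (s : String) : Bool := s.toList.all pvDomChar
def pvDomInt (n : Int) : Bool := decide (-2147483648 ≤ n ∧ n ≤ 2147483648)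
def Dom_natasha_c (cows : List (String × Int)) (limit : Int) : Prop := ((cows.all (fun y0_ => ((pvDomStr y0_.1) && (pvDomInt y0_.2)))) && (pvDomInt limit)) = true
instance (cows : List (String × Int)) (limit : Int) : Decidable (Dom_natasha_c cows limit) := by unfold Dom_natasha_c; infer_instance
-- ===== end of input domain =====

-- B sorts the cows once and forms each trip by one partition pass over the
-- still-sorted remainder; A re-sorts and re-scans the dict every round.
-- Equivalence is about the return value; neither program mutates its caller's dict.

-- ===== PORT A =====
-- A recurses on a dict that shrinks by at least one cow per round under
-- Pre_; the Nat fuel (cows.length + 1) only makes that recursion structural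
-- and is never exhausted on inputs satisfying Pre_.
-- dict.pop(cow) is ported by hand as List.eraseP on the items list (exact:
-- dict keys are distinct, so removing the first match removes the entry).
def natasha_c_go : Nat → List (String × Int) → Int → List (List String)
  | 0, _, _ => []
  | fuel+1, newcows, limit =>
    let checkcows := PySem.List.sorted newcows (fun xy => xy.2) true
    if checkcows.length = 0 then []
    else
      let trip := (checkcows.foldl
        (fun (p : List String × Int) xy =>
          if xy.2 ≤ p.2 then (p.1 ++ [xy.1], p.2 - xy.2) else p) ([], limit)).1
      let newcows2 := (newcows.map Prod.fst).foldl
        (fun d cow => if trip.contains cow then d.eraseP (fun xy => xy.1 == cow) else d) newcows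
      [trip] ++ natasha_c_go fuel newcows2 limit

def natasha_c (cows : List (String × Int)) (limit : Int) : List (List String) :=
  natasha_c_go (cows.length + 1) cows limit

-- ===== PORT B =====
-- one pass over the sorted remainder: (trip so far, rest so far, capacity left)
def natasha_c_alt_loop : Nat → List (String × Int) → Int → List (List String)
  | 0, _, _ => []
  | fuel+1, remaining, limit =>
    if remaining = [] then []
    else
      let st := remaining.foldl
        (fun (p : List String × List (String × Int) × Int) xy =>
          if xy.2 ≤ p.2.2 then (p.1 ++ [xy.1], p.2.1, p.2.2 - xy.2)
          else (p.1, p.2.1 ++ [xy], p.2.2)) ([], [], limit)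
      st.1 :: natasha_c_alt_loop fuel st.2.1 limit

def natasha_c_alt (cows : List (String × Int)) (limit : Int) : List (List String) :=
  natasha_c_alt_loop (cows.length + 1) (PySem.List.sorted cows (fun xy => xy.2) true) limit

-- ===== PRECONDITION & SPEC =====
-- Pre_: (i) the keys are distinct — cows is a Python dict, whose keys are
-- distinct by construction, so this excludes only association lists that do
-- not represent a dict; (ii) every weight is ≤ limit — if some cow weighs
-- more than limit it is never loaded, the recursion never empties the dict
-- and Python A raises RecursionError (B loops forever there too).
def Pre_natasha_c (cows : List (String × Int)) (limit : Int) : Prop :=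
  (cows.map Prod.fst).Nodup ∧ ∀ xy ∈ cows, xy.2 ≤ limit
instance (cows : List (String × Int)) (limit : Int) : Decidable (Pre_natasha_c cows limit) := by
  unfold Pre_natasha_c; infer_instance

def pvWitness_natasha_c : (List (String × Int)) × Int :=
  ([("daisy", 7), ("bella", 4), ("mabel", 7), ("rose", 2)], 10)

def Spec_natasha_c (cows : List (String × Int)) (limit : Int) (out : List (List String)) : Prop := out = natasha_c_alt cows limit
instance (cows : List (String × Int)) (limit : Int) (out : List (List String)) : Decidable (Spec_natasha_c cows limit out) := by unfold Spec_natasha_c; infer_instance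

-- ===== CLAIM (what is proved, stated in full; the proofs are below) =====
def Claim_equal_natasha_c : Prop := ∀ (cows : List (String × Int)) (limit : Int), Dom_natasha_c cows limit → Pre_natasha_c cows limit → Spec_natasha_c cows limit (natasha_c cows limit)

-- ===== LEMMAS AND PROOFS =====

-- the common greedy split of one round, in structural form
def pvScan : List (String × Int) → Int → List String × List (String × Int)
  | [], _ => ([], [])
  | (x, y) :: rest, cap =>
    if y ≤ cap then
      let p := pvScan rest (cap - y)
      (x :: p.1, p.2)
    else
      let p := pvScan rest cap
      (p.1, (x, y) :: p.2)

-- A's trip foldl computes pvScan's first component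
theorem pvFoldlA_fst : ∀ (l : List (String × Int)) (t : List String) (cap : Int),
    (l.foldl (fun (p : List String × Int) xy =>
      if xy.2 ≤ p.2 then (p.1 ++ [xy.1], p.2 - xy.2) else p) (t, cap)).1
    = t ++ (pvScan l cap).1 := by
  intro l
  induction l with
  | nil => intro t cap; simp [pvScan]
  | cons hd tl ih =>
    intro t cap
    obtain ⟨x, y⟩ := hd
    by_cases h : y ≤ cap
    · simp [pvScan, h, List.foldl_cons, ih]
    · simp [pvScan, h, List.foldl_cons, ih]

-- B's foldl computes pvScan (trip and rest components)
theorem pvFoldlB_eq : ∀ (l : List (String × Int)) (t : List String)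
    (r : List (String × Int)) (cap : Int),
    ((l.foldl (fun (p : List String × List (String × Int) × Int) xy =>
        if xy.2 ≤ p.2.2 then (p.1 ++ [xy.1], p.2.1, p.2.2 - xy.2)
        else (p.1, p.2.1 ++ [xy], p.2.2)) (t, r, cap)).1,
     (l.foldl (fun (p : List String × List (String × Int) × Int) xy =>
        if xy.2 ≤ p.2.2 then (p.1 ++ [xy.1], p.2.1, p.2.2 - xy.2)
        else (p.1, p.2.1 ++ [xy], p.2.2)) (t, r, cap)).2.1)
    = (t ++ (pvScan l cap).1, r ++ (pvScan l cap).2) := by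
  intro l
  induction l with
  | nil => intro t r cap; simp [pvScan]
  | cons hd tl ih =>
    intro t r cap
    obtain ⟨x, y⟩ := hd
    by_cases h : y ≤ cap
    · have := ih (t ++ [x]) r (cap - y)
      simp [pvScan, h, List.foldl_cons] at this ⊢
      exact this
    · have := ih t (r ++ [(x, y)]) cap
      simp [pvScan, h, List.foldl_cons] at this ⊢
      exact this

-- names taken into a trip come from the scanned list
theorem pvScan_trip_subset : ∀ (l : List (String × Int)) (cap : Int) (n : String),
    n ∈ (pvScan l cap).1 → n ∈ l.map Prod.fst := by
  intro l
  induction l with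
  | nil => intro cap n h; simp [pvScan] at h
  | cons hd tl ih =>
    intro cap n h
    obtain ⟨x, y⟩ := hd
    by_cases hy : y ≤ cap
    · simp [pvScan, hy] at h
      rcases h with h | h
      · simp [h]
      · simpa using Or.inr (ih _ _ h)
    · simp [pvScan, hy] at h
      simpa using Or.inr (ih _ _ h)

-- with distinct names, the rest of a round is the input minus the trip's names
theorem pvScan_rest_eq_filter : ∀ (l : List (String × Int)) (cap : Int),
    (l.map Prod.fst).Nodup →
    (pvScan l cap).2 = l.filter (fun xy => !((pvScan l cap).1.contains xy.1)) := by
  intro l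
  induction l with
  | nil => intro cap _; simp [pvScan]
  | cons hd tl ih =>
    intro cap hnd
    obtain ⟨x, y⟩ := hd
    simp only [List.map_cons, List.nodup_cons] at hnd
    obtain ⟨hx, hnd'⟩ := hnd
    have hne : ∀ a ∈ tl, a.1 ≠ x := fun a ha hEq => hx (hEq ▸ List.mem_map_of_mem ha)
    by_cases hy : y ≤ cap
    · -- x is taken: it is dropped by the filter, names of tl avoid x
      have hrec := ih (cap - y) hnd'
      have hstep : pvScan ((x, y) :: tl) cap
          = (x :: (pvScan tl (cap - y)).1, (pvScan tl (cap - y)).2) := by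
        simp [pvScan, hy]
      rw [hstep, List.filter_cons]
      have hhead : (!((x :: (pvScan tl (cap - y)).1).contains (x, y).1)) = false := by simp
      rw [hhead, if_neg (by simp)]
      have hcong : tl.filter (fun xy => !((x :: (pvScan tl (cap - y)).1).contains xy.1))
          = tl.filter (fun xy => !((pvScan tl (cap - y)).1.contains xy.1)) := by
        apply List.filter_congr
        intro a ha
        simp [hne a ha]
      rw [hcong]
      exact hrec
    · -- x is skipped: it is kept by the filter since its name is not in the trip
      have hrec := ih cap hnd'
      have hxmem : x ∉ (pvScan tl cap).1 := fun hm => hx (pvScan_trip_subset tl cap x hm)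
      have hstep : pvScan ((x, y) :: tl) cap
          = ((pvScan tl cap).1, (x, y) :: (pvScan tl cap).2) := by
        simp [pvScan, hy]
      rw [hstep, List.filter_cons]
      have hhead : (!((pvScan tl cap).1.contains (x, y).1)) = true := by simp [hxmem]
      rw [hhead, if_pos rfl, hrec]

-- with distinct keys, popping the (unique) entry for k is filtering k out
theorem pvEraseP_eq_filter : ∀ (d : List (String × Int)) (k : String),
    (d.map Prod.fst).Nodup →
    d.eraseP (fun xy => xy.1 == k) = d.filter (fun xy => !(xy.1 == k)) := by
  intro d
  induction d with
  | nil => intro k _; simp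
  | cons hd tl ih =>
    intro k hnd
    obtain ⟨a, b⟩ := hd
    simp only [List.map_cons, List.nodup_cons] at hnd
    obtain ⟨ha, hnd'⟩ := hnd
    by_cases h : a = k
    · subst h
      have hall : ∀ x ∈ tl, (!(x.1 == a)) = true := by
        intro x hxm
        have : x.1 ≠ a := fun hEq => ha (hEq ▸ List.mem_map_of_mem hxm)
        simp [this]
      simp [List.eraseP_cons, List.filter_cons, List.filter_eq_self.mpr hall]
    · have hba : ((a, b).1 == k) = false := by simp [h]
      simp [List.eraseP_cons, List.filter_cons, hba, ih k hnd']

-- A's pop loop over all keys removes exactly the entries whose key is in trip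
theorem pvPopFold (trip : List String) : ∀ (ks : List String) (d : List (String × Int)),
    (d.map Prod.fst).Nodup →
    ks.foldl (fun d cow => if trip.contains cow then d.eraseP (fun xy => xy.1 == cow) else d) d
    = d.filter (fun xy => !(decide (xy.1 ∈ ks) && trip.contains xy.1)) := by
  intro ks
  induction ks with
  | nil => intro d _; simp
  | cons k ks' ih =>
    intro d hnd
    simp only [List.foldl_cons]
    by_cases hk : trip.contains k = true
    · have hk' : k ∈ trip := by simpa using hk
      rw [if_pos hk, pvEraseP_eq_filter d k hnd]
      have hnd2 : ((d.filter (fun xy => !(xy.1 == k))).map Prod.fst).Nodup :=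
        List.Nodup.sublist ((List.filter_sublist (l := d)).map Prod.fst) hnd
      rw [ih _ hnd2]
      rw [List.filter_filter]
      apply List.filter_congr
      intro a _
      by_cases hak : a.1 = k
      · simp [hak, hk']
      · simp [hak]
    · have hk' : k ∉ trip := by simpa using hk
      rw [if_neg hk, ih d hnd]
      apply List.filter_congr
      intro a _
      by_cases hak : a.1 = k
      · simp [hak, hk']
      · simp [hak]

-- stable insertion step commutes with filter on a descending accumulator
theorem pvFilter_insertBy (p : String × Int → Bool) (x : String × Int) :
    ∀ (acc : List (String × Int)),
    acc.Pairwise (fun a b => b.2 ≤ a.2) →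
    (PySem.List.insertBy (fun a b => decide (b.2 < a.2)) x acc).filter p
    = if p x then PySem.List.insertBy (fun a b => decide (b.2 < a.2)) x (acc.filter p)
      else acc.filter p := by
  intro acc
  induction acc with
  | nil =>
    intro _
    by_cases hp : p x = true <;> simp [PySem.List.insertBy, hp, List.filter_cons]
  | cons y ys ih =>
    intro hs
    have hs' : ys.Pairwise (fun a b => b.2 ≤ a.2) := hs.tail
    have hyall : ∀ z ∈ ys, z.2 ≤ y.2 := fun z hz => (List.pairwise_cons.mp hs).1 z hz
    by_cases hb : (y.2 : Int) < x.2
    · -- x goes in front; every surviving element is still lighter than x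
      have hfront : PySem.List.insertBy (fun a b => decide (b.2 < a.2)) x (y :: ys)
          = x :: y :: ys := by
        simp [PySem.List.insertBy, hb]
      rw [hfront]
      by_cases hp : p x = true
      · have : PySem.List.insertBy (fun a b => decide (b.2 < a.2)) x ((y :: ys).filter p)
            = x :: (y :: ys).filter p := by
          rcases hfy : (y :: ys).filter p with _ | ⟨z, zs⟩
          · simp [PySem.List.insertBy]
          · have hz : z ∈ (y :: ys) := List.mem_of_mem_filter (hfy ▸ List.mem_cons_self)
            have hzx : (z.2 : Int) < x.2 := by
              rcases List.mem_cons.mp hz with h | h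
              · exact h ▸ hb
              · exact lt_of_le_of_lt (hyall z h) hb
            simp [PySem.List.insertBy, hzx]
        rw [if_pos hp, this, List.filter_cons, if_pos hp]
      · simp only [Bool.not_eq_true] at hp
        simp [List.filter_cons, hp]
    · -- x passes y
      have hstep : PySem.List.insertBy (fun a b => decide (b.2 < a.2)) x (y :: ys)
          = y :: PySem.List.insertBy (fun a b => decide (b.2 < a.2)) x ys := by
        simp [PySem.List.insertBy, hb]
      rw [hstep]
      by_cases hpy : p y = true
      · have hstep2 : PySem.List.insertBy (fun a b => decide (b.2 < a.2)) x ((y :: ys).filter p)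
            = y :: PySem.List.insertBy (fun a b => decide (b.2 < a.2)) x (ys.filter p) := by
          simp [List.filter_cons, hpy, PySem.List.insertBy, hb]
        by_cases hp : p x = true
        · simp [List.filter_cons, hpy, hp, ih hs', PySem.List.insertBy, hb]
        · simp only [Bool.not_eq_true] at hp
          simp [List.filter_cons, hpy, hp, ih hs']
      · simp only [Bool.not_eq_true] at hpy
        simp [List.filter_cons, hpy, ih hs']

-- the stable descending sort commutes with filtering
theorem pvSorted_filter (p : String × Int → Bool) (xs : List (String × Int)) :
    (PySem.List.sorted xs (fun xy => xy.2) true).filter p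
    = PySem.List.sorted (xs.filter p) (fun xy => xy.2) true := by
  induction xs using List.reverseRecOn with
  | nil => simp [PySem.List.sorted_rev_eq_foldl_insertBy]
  | append_singleton xs x ih =>
    have hfold := PySem.List.sorted_rev_eq_foldl_insertBy (xs ++ [x]) (fun xy : String × Int => xy.2)
    rw [hfold, List.foldl_append]
    simp only [List.foldl_cons, List.foldl_nil]
    rw [← PySem.List.sorted_rev_eq_foldl_insertBy xs (fun xy : String × Int => xy.2)]
    have hpw : (PySem.List.sorted xs (fun xy : String × Int => xy.2) true).Pairwise
        (fun a b => b.2 ≤ a.2) := PySem.List.sorted_pairwise_rev xs _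
    rw [pvFilter_insertBy p x _ hpw, ih]
    by_cases hp : p x = true
    · rw [if_pos hp]
      have hfp : (xs ++ [x]).filter p = xs.filter p ++ [x] := by
        simp [List.filter_append, List.filter_cons, hp]
      rw [hfp]
      rw [PySem.List.sorted_rev_eq_foldl_insertBy (xs.filter p ++ [x]) (fun xy : String × Int => xy.2),
        List.foldl_append]
      simp only [List.foldl_cons, List.foldl_nil]
      rw [← PySem.List.sorted_rev_eq_foldl_insertBy (xs.filter p) (fun xy : String × Int => xy.2)]
    · simp only [Bool.not_eq_true] at hp
      simp [hp, List.filter_append, List.filter_cons]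

-- the keys of a filtered list stay distinct
theorem pvNodup_filter (xs : List (String × Int)) (q : String × Int → Bool)
    (h : (xs.map Prod.fst).Nodup) : ((xs.filter q).map Prod.fst).Nodup :=
  List.Nodup.sublist ((List.filter_sublist (l := xs)).map Prod.fst) h

-- core equivalence: same fuel, A's round = B's round on the sorted list
theorem pvGo_eq : ∀ (fuel : Nat) (xs : List (String × Int)) (limit : Int),
    (xs.map Prod.fst).Nodup →
    natasha_c_go fuel xs limit
    = natasha_c_alt_loop fuel (PySem.List.sorted xs (fun xy => xy.2) true) limit := by
  intro fuel
  induction fuel with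
  | zero => intro xs limit _; rfl
  | succ n ih =>
    intro xs limit hnd
    by_cases hxs : xs = []
    · subst hxs
      have : PySem.List.sorted ([] : List (String × Int)) (fun xy => xy.2) true = [] :=
        (PySem.List.sorted_eq_nil_iff _ _ _).mpr rfl
      simp [natasha_c_go, natasha_c_alt_loop, this]
    · have hsne : PySem.List.sorted xs (fun xy => xy.2) true ≠ [] := by
        intro h; exact hxs ((PySem.List.sorted_eq_nil_iff _ _ _).mp h)
      set s := PySem.List.sorted xs (fun xy => xy.2) true with hs
      have hlen : ¬ s.length = 0 := by
        intro h; exact hsne (List.eq_nil_of_length_eq_zero h)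
      -- unfold one round of each
      rw [natasha_c_go, natasha_c_alt_loop]
      rw [if_neg hlen, if_neg hsne]
      -- the trips of the round agree
      have hA := pvFoldlA_fst s [] limit
      have hB := pvFoldlB_eq s [] [] limit
      have hB1 : (s.foldl (fun (p : List String × List (String × Int) × Int) xy =>
          if xy.2 ≤ p.2.2 then (p.1 ++ [xy.1], p.2.1, p.2.2 - xy.2)
          else (p.1, p.2.1 ++ [xy], p.2.2)) ([], [], limit)).1 = (pvScan s limit).1 := by
        have := congrArg Prod.fst hB; simpa using this
      have hB2 : (s.foldl (fun (p : List String × List (String × Int) × Int) xy =>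
          if xy.2 ≤ p.2.2 then (p.1 ++ [xy.1], p.2.1, p.2.2 - xy.2)
          else (p.1, p.2.1 ++ [xy], p.2.2)) ([], [], limit)).2.1 = (pvScan s limit).2 := by
        have := congrArg Prod.snd hB; simpa using this
      simp only [List.nil_append] at hA
      simp only [← hs]
      simp only [hA, hB1, hB2]
      -- the next inputs agree
      have hsnd : (s.map Prod.fst).Nodup := by
        have hperm : s.Perm xs := PySem.List.sorted_perm xs _ _
        exact ((hperm.map Prod.fst).nodup_iff).mpr hnd
      have hrest : (pvScan s limit).2
          = s.filter (fun xy => !((pvScan s limit).1.contains xy.1)) :=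
        pvScan_rest_eq_filter s limit hsnd
      have hpop := pvPopFold (pvScan s limit).1 (xs.map Prod.fst) xs hnd
      have hpop' : (xs.map Prod.fst).foldl
          (fun d cow => if (pvScan s limit).1.contains cow then
            d.eraseP (fun xy => xy.1 == cow) else d) xs
          = xs.filter (fun xy => !((pvScan s limit).1.contains xy.1)) := by
        rw [hpop]
        apply List.filter_congr
        intro a ha
        have : a.1 ∈ xs.map Prod.fst := List.mem_map_of_mem ha
        simp [this]
      rw [hpop', hrest]
      rw [ih _ limit (pvNodup_filter xs _ hnd)]
      rw [← pvSorted_filter (fun xy => !((pvScan s limit).1.contains xy.1)) xs]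
      simp only [← hs]
      rfl

-- ===== VERDICT (by name: the statement is the Claim_ definition above) =====
theorem natasha_c_spec : Claim_equal_natasha_c := by
  intro cows limit _ hpre
  unfold Spec_natasha_c natasha_c natasha_c_alt
  exact pvGo_eq (cows.length + 1) cows limit hpre.1
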